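-- pv_equiv track=rewrite | github.com/purarue/calcurse-load | calcurse_load/parse.py | extract_datasource
-- ===== SOURCE A (Python) =====
-- import string
--
-- ALLOWED = set(string.ascii_letters)
--
-- def extract_datasource(line: str) -> str | None:
--     if not line.endswith("]"):
--         return
--     last_left = line.rfind("[")
--     between = line[last_left + 1 : -1]
--     if not all(c in ALLOWED for c in between):
--         return None
--     return between
-- ===== SOURCE B (Python) =====
-- def extract_datasource(line: str) -> str | None:
--     if not line.endswith("]"):
--         return None
--     letters = []
--     for c in reversed(line[:-1]):
--         if "a" <= c <= "z" or "A" <= c <= "Z":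
--             letters.append(c)
--         elif c == "[":
--             break
--         else:
--             return None
--     letters.reverse()
--     return "".join(letters)
-- ===== Notes on version B (the rewrite author's own statement) =====
-- stated objective: alternative
-- what changed: B replaces A's rfind-for-'['/slice/all-in-ALLOWED-set passes with a single backward scan from the closing ']' that collects letters and stops at the first '[' (return collected) or other non-letter (return None).
import Mathlib
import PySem

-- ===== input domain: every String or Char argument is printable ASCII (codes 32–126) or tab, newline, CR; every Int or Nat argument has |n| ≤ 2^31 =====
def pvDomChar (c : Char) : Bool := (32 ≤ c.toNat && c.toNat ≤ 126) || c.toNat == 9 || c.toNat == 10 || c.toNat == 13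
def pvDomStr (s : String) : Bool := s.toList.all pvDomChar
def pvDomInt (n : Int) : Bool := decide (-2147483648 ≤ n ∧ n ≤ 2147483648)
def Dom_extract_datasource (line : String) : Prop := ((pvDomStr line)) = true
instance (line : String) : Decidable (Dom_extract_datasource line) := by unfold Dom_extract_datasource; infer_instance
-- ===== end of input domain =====

-- B replaces A's rfind/slice/all-in-set passes with one backward scan from the ']'; same O(n) cost, different structure.

-- ===== PORT A =====
-- ALLOWED = set(string.ascii_letters)
def ALLOWED : PySem.Set Char :=
  PySem.Set.ofList "abcdefghijklmnopqrstuvwxyzABCDEFGHIJKLMNOPQRSTUVWXYZ".toList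

def extract_datasource (line : String) : Option String :=
  if PySem.Str.endswith line "]" then
    let lastLeft : Int := PySem.Chars.rfind line.toList ['[']
    let between : List Char := PySem.Chars.slice line.toList (some (lastLeft + 1)) (some (-1))
    if between.all (fun c => ALLOWED.contains c) then some (String.ofList between)
    else none
  else none

-- ===== PORT B =====
-- "a" <= c <= "z" or "A" <= c <= "Z": code-point comparison, exact for Python's 1-char strings
def isAsciiLetterB (c : Char) : Bool :=
  (97 ≤ c.toNat && c.toNat ≤ 122) || (65 ≤ c.toNat && c.toNat ≤ 90)

-- the for-loop over reversed(line[:-1]); Python appends then reverses once at the end,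
-- here the accumulator is prepended to, producing the same final list
def scanBackB : List Char → List Char → Option (List Char)
  | [], letters => some letters
  | c :: rest, letters =>
    if isAsciiLetterB c then scanBackB rest (c :: letters)
    else if c = '[' then some letters
    else none

def extract_datasource_alt (line : String) : Option String :=
  if PySem.Str.endswith line "]" then
    match scanBackB (PySem.Chars.slice line.toList none (some (-1))).reverse [] with
    | some letters => some (String.ofList letters)
    | none => none
  else none

-- ===== PRECONDITION & SPEC =====
def Spec_extract_datasource (line : String) (out : Option String) : Prop := out = extract_datasource_alt line
instance (line : String) (out : Option String) : Decidable (Spec_extract_datasource line out) := by unfold Spec_extract_datasource; infer_instance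

-- ===== CLAIM (what is proved, stated in full; the proofs are below) =====
def Claim_equal_extract_datasource : Prop := ∀ (line : String), Dom_extract_datasource line → Spec_extract_datasource line (extract_datasource line)

-- ===== LEMMAS AND PROOFS =====

set_option maxRecDepth 8192 in
lemma allowed_fun : (fun c => ALLOWED.contains c) = isAsciiLetterB := by
  have hA : ALLOWED = ['a', 'b', 'c', 'd', 'e', 'f', 'g', 'h', 'i', 'j', 'k', 'l', 'm', 'n', 'o', 'p', 'q', 'r', 's', 't', 'u', 'v', 'w', 'x', 'y', 'z', 'A', 'B', 'C', 'D', 'E', 'F', 'G', 'H', 'I', 'J', 'K', 'L', 'M', 'N', 'O', 'P', 'Q', 'R', 'S', 'T', 'U', 'V', 'W', 'X', 'Y', 'Z'] := by decide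
  funext c
  rw [Bool.eq_iff_iff, hA]
  constructor
  · intro h
    have hm : c ∈ (['a', 'b', 'c', 'd', 'e', 'f', 'g', 'h', 'i', 'j', 'k', 'l', 'm', 'n', 'o', 'p', 'q', 'r', 's', 't', 'u', 'v', 'w', 'x', 'y', 'z', 'A', 'B', 'C', 'D', 'E', 'F', 'G', 'H', 'I', 'J', 'K', 'L', 'M', 'N', 'O', 'P', 'Q', 'R', 'S', 'T', 'U', 'V', 'W', 'X', 'Y', 'Z'] : List Char) := by simpa using h
    fin_cases hm <;> decide
  · intro h
    have e := Char.ofNat_toNat c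
    have hb : (97 ≤ c.toNat ∧ c.toNat ≤ 122) ∨ (65 ≤ c.toNat ∧ c.toNat ≤ 90) := by
      simp only [isAsciiLetterB, Bool.or_eq_true, Bool.and_eq_true, decide_eq_true_eq] at h
      exact h
    set n := c.toNat with hn
    rcases hb with ⟨h1, h2⟩ | ⟨h1, h2⟩ <;> (interval_cases n <;> (rw [← e]; decide))

lemma single_prefix (c : Char) (l : List Char) : ([c].isPrefixOf l) = true ↔ l.head? = some c := by
  rw [List.isPrefixOf_iff_prefix]
  cases l with
  | nil => simp
  | cons x t => simp [List.cons_prefix_cons, eq_comm]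

lemma rfind_go_spec (cs : List Char) (c : Char) (j : Nat) :
    (PySem.Chars.rfind.go cs [c] j = -1 ∧ ∀ i : Nat, i ≤ j → cs[i]? ≠ some c) ∨
    (∃ k : Nat, k ≤ j ∧ PySem.Chars.rfind.go cs [c] j = (k : Int) ∧ cs[k]? = some c ∧
      ∀ i : Nat, k < i → i ≤ j → cs[i]? ≠ some c) := by
  induction j with
  | zero =>
    by_cases h : [c].isPrefixOf cs
    · right
      refine ⟨0, le_refl 0, by simp [PySem.Chars.rfind.go, h], ?_, by omega⟩
      have := (single_prefix c cs).mp h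
      simpa [← List.head?_drop (l := cs) (i := 0)] using this
    · left
      refine ⟨by simp [PySem.Chars.rfind.go, h], ?_⟩
      intro i hi
      interval_cases i
      have := (single_prefix c cs).not.mp h
      simpa [← List.head?_drop (l := cs) (i := 0)] using this
  | succ j ih =>
    by_cases h : [c].isPrefixOf (cs.drop (j+1))
    · right
      refine ⟨j+1, le_refl _, by simp [PySem.Chars.rfind.go, h], ?_, by omega⟩
      have := (single_prefix c _).mp h
      rwa [List.head?_drop] at this
    · have hnext : cs[j+1]? ≠ some c := by
        have := (single_prefix c _).not.mp h
        rwa [List.head?_drop] at this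
      have hgo : PySem.Chars.rfind.go cs [c] (j+1) = PySem.Chars.rfind.go cs [c] j := by
        simp [PySem.Chars.rfind.go, h]
      rcases ih with ⟨h1, h2⟩ | ⟨k, hk, he, hv, ha⟩
      · left
        refine ⟨hgo.trans h1, ?_⟩
        intro i hi
        rcases Nat.lt_or_ge i (j+1) with hlt | hge
        · exact h2 i (by omega)
        · have : i = j + 1 := by omega
          rw [this]; exact hnext
      · right
        refine ⟨k, by omega, hgo.trans he, hv, ?_⟩
        intro i hki hi
        rcases Nat.lt_or_ge i (j+1) with hlt | hge
        · exact ha i hki (by omega)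
        · have : i = j + 1 := by omega
          rw [this]; exact hnext

lemma rfind_char_spec (cs : List Char) (c : Char) :
    (PySem.Chars.rfind cs [c] = -1 ∧ c ∉ cs) ∨
    (∃ k : Nat, PySem.Chars.rfind cs [c] = (k : Int) ∧ cs[k]? = some c ∧
      ∀ i : Nat, k < i → cs[i]? ≠ some c) := by
  have hs := rfind_go_spec cs c cs.length
  have hr : PySem.Chars.rfind cs [c] = PySem.Chars.rfind.go cs [c] cs.length := by
    simp [PySem.Chars.rfind]
  rcases hs with ⟨h1, h2⟩ | ⟨k, hk, he, hv, ha⟩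
  · left
    refine ⟨hr.trans h1, ?_⟩
    intro hmem
    obtain ⟨i, hi, hgi⟩ := List.getElem_of_mem hmem
    exact h2 i (by omega) (by simp [List.getElem?_eq_getElem hi, hgi])
  · right
    refine ⟨k, hr.trans he, hv, ?_⟩
    intro i hki
    rcases Nat.lt_or_ge cs.length i with hgt | hle
    · simp [List.getElem?_eq_none (show cs.length ≤ i by omega)]
    · exact ha i hki hle

lemma rfind_eq_neg_one (cs : List Char) (c : Char) (h : c ∉ cs) :
    PySem.Chars.rfind cs [c] = -1 := by
  rcases rfind_char_spec cs c with ⟨h1, _⟩ | ⟨k, _, hk, _⟩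
  · exact h1
  · exact absurd (List.mem_of_getElem? hk) h

lemma rfind_eq_of (cs : List Char) (c : Char) (k : Nat) (hk : cs[k]? = some c)
    (hafter : ∀ i : Nat, k < i → cs[i]? ≠ some c) :
    PySem.Chars.rfind cs [c] = (k : Int) := by
  rcases rfind_char_spec cs c with ⟨_, h2⟩ | ⟨k', e, hk', hafter'⟩
  · exact absurd (List.mem_of_getElem? hk) h2
  · rcases lt_trichotomy k k' with h | h | h
    · exact absurd hk' (hafter k' h)
    · rw [e, h]
    · exact absurd hk (hafter' k h)

lemma slice_nat_neg_one {α : Type} (xs : List α) (n : Nat) :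
    PySem.List.slice xs (some (n : Int)) (some (-1)) = (xs.dropLast).drop n := by
  simp only [PySem.List.slice, PySem.List.clampIdx]
  have h1 : ¬((n : Int) < 0) := by omega
  rw [if_neg h1, if_pos (by norm_num : (-1 : Int) < 0)]
  rw [List.dropLast_eq_take]
  by_cases h0 : xs.length = 0
  · simp [h0]
  · rw [if_neg (by omega : ¬((xs.length : Int) + -1 < 0))]
    have h2 : ((xs.length : Int) + -1).toNat = xs.length - 1 := by omega
    have h3 : (n : Int).toNat = n := by omega
    rw [h2, h3, List.drop_take]
    by_cases h : n ≤ xs.length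
    · rw [min_eq_left h]
    · rw [min_eq_right (by omega)]
      rw [List.take_eq_nil_iff.mpr (by omega), List.drop_eq_nil_iff.mpr (by omega),
        List.take_nil]

lemma scanB_spec (rcs acc : List Char) :
    scanBackB rcs acc =
      match rcs.dropWhile isAsciiLetterB with
      | [] => some ((rcs.takeWhile isAsciiLetterB).reverse ++ acc)
      | c :: _ => if c = '[' then some ((rcs.takeWhile isAsciiLetterB).reverse ++ acc) else none := by
  induction rcs generalizing acc with
  | nil => simp [scanBackB]
  | cons c rest ih =>
    by_cases hc : isAsciiLetterB c
    · simp [scanBackB, hc, ih]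
    · simp [scanBackB, hc]

-- ===== VERDICT (by name: the statement is the Claim_ definition above) =====
theorem extract_datasource_spec : Claim_equal_extract_datasource := by
  intro line _
  unfold Spec_extract_datasource extract_datasource extract_datasource_alt
  by_cases hE : PySem.Str.endswith line "]" = true
  case neg =>
    simp only [PySem.Str.endswith_eq] at hE
    simp at hE
    simp [hE]
  rw [if_pos hE, if_pos hE]
  have hsuf : [']'] <:+ line.toList := by
    have h := hE
    rw [PySem.Str.endswith_eq, PySem.Chars.endswith_iff] at h
    simpa using h
  obtain ⟨ys, hys⟩ := hsuf
  rw [← hys]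
  simp only [PySem.Chars.slice_eq_listSlice, allowed_fun]
  rw [PySem.List.slice_to_neg_one, List.dropLast_concat, scanB_spec]
  have htr := List.takeWhile_append_dropWhile (p := isAsciiLetterB) (l := ys.reverse)
  rcases hrr : ys.reverse.dropWhile isAsciiLetterB with _ | ⟨c, r'⟩
  · -- no non-letter from the right: ys is all letters, no '[' anywhere
    rw [hrr, List.append_nil] at htr
    have hall : ∀ x ∈ ys, isAsciiLetterB x = true := by
      intro x hx
      exact List.mem_takeWhile_imp (htr ▸ (List.mem_reverse.mpr hx))
    have hnm : '[' ∉ ys ++ [']'] := by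
      intro hm
      rcases List.mem_append.mp hm with h | h
      · have := hall _ h; exact absurd this (by decide)
      · simp at h
    rw [rfind_eq_neg_one _ _ hnm]
    have h0 : (-1 : Int) + 1 = ((0 : Nat) : Int) := by norm_num
    rw [h0, slice_nat_neg_one, List.dropLast_concat, List.drop_zero]
    rw [if_pos (List.all_eq_true.mpr hall)]
    rw [htr, List.reverse_reverse]
    simp
  · -- ys = r'.reverse ++ [c] ++ t.reverse with c not a letter
    set t := ys.reverse.takeWhile isAsciiLetterB with ht
    have hc : isAsciiLetterB c = false := by
      have h := List.head?_dropWhile_not isAsciiLetterB ys.reverse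
      rw [hrr] at h
      simpa using h
    have hys2 : ys = (r'.reverse ++ [c]) ++ t.reverse := by
      have := congrArg List.reverse htr
      rw [List.reverse_reverse] at this
      rw [← this, hrr]
      simp
    have htlet : ∀ x ∈ t.reverse, isAsciiLetterB x = true := by
      intro x hx
      exact List.mem_takeWhile_imp (List.mem_reverse.mp hx)
    set p := (r'.reverse ++ [c]).length - 1 with hp
    have hplen : (r'.reverse ++ [c]).length = p + 1 := by simp [hp]
    have hcs_at_p : (ys ++ [']'])[p]? = some c := by
      rw [hys2, List.append_assoc, List.append_assoc]
      rw [List.getElem?_append_right (by simp [hp])]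
      simp [hp]
    have hdrop : (ys ++ [']']).drop (p + 1) = t.reverse ++ [']'] := by
      rw [hys2, List.append_assoc, ← hplen, List.drop_left]
    have hafter : ∀ i : Nat, p < i → (ys ++ [']'])[i]? ≠ some '[' := by
      intro i hi h
      have hmem : '[' ∈ t.reverse ++ [']'] := by
        apply List.mem_of_getElem? (i := i - (p + 1))
        rw [← hdrop, List.getElem?_drop]
        rw [show p + 1 + (i - (p + 1)) = i by omega]
        exact h
      rcases List.mem_append.mp hmem with h2 | h2
      · exact absurd (htlet _ h2) (by decide)
      · simp at h2
    by_cases hc2 : c = '['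
    · -- stop at the last '[': both return the letters after it
      subst hc2
      rw [rfind_eq_of _ _ p hcs_at_p hafter]
      have h1 : (p : Int) + 1 = (((p + 1 : Nat)) : Int) := by push_cast; ring
      rw [h1, slice_nat_neg_one, List.dropLast_concat]
      rw [hys2, ← hplen, List.drop_left]
      rw [if_pos (List.all_eq_true.mpr htlet)]
      simp
    · -- a non-letter, non-'[' char before the letters: both return none
      have hcys : c ∈ ys := by rw [hys2]; simp
      rcases rfind_char_spec (ys ++ [']']) '[' with ⟨hre, hnm⟩ | ⟨k, hre, hkv, hka⟩
      · rw [hre]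
        have h0 : (-1 : Int) + 1 = ((0 : Nat) : Int) := by norm_num
        rw [h0, slice_nat_neg_one, List.dropLast_concat, List.drop_zero]
        have hallf : ¬ ((ys.all fun c => isAsciiLetterB c) = true) := by
          intro hall
          exact absurd (List.all_eq_true.mp hall c hcys) (by simp [hc])
        rw [if_neg hallf]
        simp [hc2]
      · have hkp : k < p := by
          rcases lt_trichotomy k p with h | h | h
          · exact h
          · exfalso
            rw [h, hcs_at_p] at hkv
            have : c = '[' := by simpa using hkv
            exact hc2 this
          · exact absurd hkv (hafter k h)
        rw [hre]
        have h1 : (k : Int) + 1 = (((k + 1 : Nat)) : Int) := by push_cast; ring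
        rw [h1, slice_nat_neg_one, List.dropLast_concat]
        have hcmem : c ∈ ys.drop (k + 1) := by
          rw [hys2, List.append_assoc]
          have hp2 : p = r'.length := by simp [hp]
          rw [List.drop_append_of_le_length (by simp; omega)]
          simp
        have hallf : ¬ (((ys.drop (k + 1)).all fun c => isAsciiLetterB c) = true) := by
          intro hall
          exact absurd (List.all_eq_true.mp hall c hcmem) (by simp [hc])
        rw [if_neg hallf]
        simp [hc2]
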